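-- pv_equiv track=rewrite | github.com/aduriseti/nemotron | reasoners/cot_lang/compile_program.py | _next_block_index
-- ===== SOURCE A (Python) =====
-- def _next_block_index(lines: list[str]) -> list[int]:
--     """For each index i, return the index of the nearest BLOCK line at or after i."""
--     n = len(lines)
--     result = [n] * n
--     nxt = n
--     for j in range(n - 1, -1, -1):
--         if lines[j].startswith("BLOCK "):
--             nxt = j
--         result[j] = nxt
--     return result
-- ===== SOURCE B (Python) =====
-- def _next_block_index(lines: list[str]) -> list[int]:
--     """For each index i, return the index of the nearest BLOCK line at or after i."""
--     n = len(lines)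
--     blocks = [j for j, s in enumerate(lines) if s.startswith("BLOCK ")]
--     result = []
--     k = 0
--     for i in range(n):
--         if k < len(blocks) and blocks[k] < i:
--             k += 1
--         result.append(blocks[k] if k < len(blocks) else n)
--     return result
-- ===== Notes on version B (the rewrite author's own statement) =====
-- stated objective: alternative
-- what changed: Replaces the backward sweep that propagates a running next-pointer through a preallocated mutated array with two forward passes: first build the list of BLOCK line indices, then walk i forward keeping a pointer into that index list and append the first block index >= i (or n).
import Mathlib
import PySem

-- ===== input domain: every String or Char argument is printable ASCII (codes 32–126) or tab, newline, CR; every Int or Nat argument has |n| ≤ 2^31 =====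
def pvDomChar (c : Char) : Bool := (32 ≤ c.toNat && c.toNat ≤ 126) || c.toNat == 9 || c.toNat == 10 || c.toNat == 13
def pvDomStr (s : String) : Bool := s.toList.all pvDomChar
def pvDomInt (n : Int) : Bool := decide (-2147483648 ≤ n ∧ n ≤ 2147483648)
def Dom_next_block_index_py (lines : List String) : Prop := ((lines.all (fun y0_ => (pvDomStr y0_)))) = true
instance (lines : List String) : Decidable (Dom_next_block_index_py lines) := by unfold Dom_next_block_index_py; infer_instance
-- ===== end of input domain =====

-- B replaces A's backward next-pointer sweep over a preallocated mutated array by two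
-- forward passes: build the list of BLOCK line indices, then walk forward with a
-- pointer into it, emitting the first block index >= i (or n); same cost, different
-- algorithm ("alternative").


-- ===== PORT A =====
def next_block_index_py (lines : List String) : List Int :=
  let n : Int := PySem.List.len lines
  let result : List Int := PySem.List.pyRepeat [n] n
  let st :=
    (PySem.List.pyRange (n - 1) (-1) (-1)).foldl
      (fun (st : Int × List Int) j =>
        let nxt : Int :=
          if PySem.Str.startswith (PySem.List.pyGetD lines j "") "BLOCK " then j else st.1
        (nxt, PySem.List.pySetD st.2 j nxt))
      (n, result)
  st.2

-- ===== PORT B =====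
def next_block_index_py_alt (lines : List String) : List Int :=
  let n : Int := PySem.List.len lines
  let blocks : List Int :=
    ((PySem.List.enumerate lines).filter
      (fun p => PySem.Str.startswith p.2 "BLOCK ")).map (fun p => p.1)
  (((PySem.List.pyRange 0 n 1).foldl
      (fun (st : List Int × Int) i =>
        let k : Int :=
          if st.2 < PySem.List.len blocks ∧ PySem.List.pyGetD blocks st.2 0 < i
          then st.2 + 1 else st.2
        (st.1 ++ [if k < PySem.List.len blocks then PySem.List.pyGetD blocks k 0 else n], k))
      ([], 0)).1)

-- ===== PRECONDITION & SPEC =====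
def Spec_next_block_index_py (lines : List String) (out : List Int) : Prop := out = next_block_index_py_alt lines
instance (lines : List String) (out : List Int) : Decidable (Spec_next_block_index_py lines out) := by unfold Spec_next_block_index_py; infer_instance

-- ===== CLAIM (what is proved, stated in full; the proofs are below) =====
def Claim_equal_next_block_index_py : Prop := ∀ (lines : List String), Dom_next_block_index_py lines → Spec_next_block_index_py lines (next_block_index_py lines)

-- ===== LEMMAS AND PROOFS =====

-- proof-side helpers: the Python 'BLOCK ' test, the block-index list with a start
-- offset, and g = "first block index >= i in the suffix, else the end index"
def isB (s : String) : Bool := PySem.Str.startswith s "BLOCK "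


def bkAux (xs : List String) (s : Int) : List Int :=
  ((PySem.List.enumerate xs s).filter (fun p => isB p.2)).map (fun p => p.1)

def g (xs : List String) (s i : Int) : Int :=
  ((bkAux xs s).find? (fun b => decide (i ≤ b))).getD (s + xs.length)

theorem bkAux_nil (s : Int) : bkAux [] s = [] := rfl

theorem bkAux_cons (x : String) (xs : List String) (s : Int) :
    bkAux (x :: xs) s = (if isB x then [s] else []) ++ bkAux xs (s + 1) := by
  simp [bkAux, PySem.List.enumerate_cons]
  split_ifs with h <;> simp [h]

theorem g_nil (s i : Int) : g [] s i = s := by simp [g, bkAux_nil]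

theorem g_cons (x : String) (xs : List String) (s i : Int) :
    g (x :: xs) s i = if isB x ∧ i ≤ s then s else g xs (s + 1) i := by
  unfold g
  rw [bkAux_cons]
  by_cases hx : isB x <;> by_cases hi : i ≤ s <;>
    simp [hx, hi] <;> ring_nf

theorem g_clamp (xs : List String) : ∀ s i i' : Int, i ≤ s → i' ≤ s → g xs s i = g xs s i' := by
  induction xs with
  | nil => intro s i i' _ _; simp [g_nil]
  | cons x xs ih =>
    intro s i i' hi hi'
    rw [g_cons, g_cons]
    by_cases hx : isB x
    · simp [hx, hi, hi']
    · simp [hx]; exact ih (s+1) i i' (by omega) (by omega)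

theorem g_high (xs : List String) : ∀ s i : Int, s + xs.length ≤ i → g xs s i = s + xs.length := by
  induction xs with
  | nil => intro s i h; simpa using g_nil s i
  | cons x xs ih =>
    intro s i h
    rw [g_cons]
    have hlen : (0:Int) ≤ xs.length := by positivity
    have : ¬ (isB x ∧ i ≤ s) := by
      rintro ⟨_, hi⟩; simp at h; omega
    rw [if_neg this, ih (s+1) i (by simp at h ⊢; omega)]
    simp; ring

theorem g_step (xs : List String) : ∀ s j : Int, s ≤ j → j < s + xs.length →
    g xs s j = if isB (xs.getD (j - s).toNat "") then j else g xs s (j + 1) := by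
  induction xs with
  | nil => intro s j h1 h2; simp at h1 h2; omega
  | cons x xs ih =>
    intro s j h1 h2
    rw [g_cons, g_cons]
    by_cases hj : j = s
    · subst hj
      by_cases hx : isB x
      · simp [hx]
      · simp only [show (j - j).toNat = 0 from by omega, List.getD_cons_zero]
        simp [hx]
        exact g_clamp xs (j+1) j (j+1) (by omega) (by omega)
    · have hjs : s + 1 ≤ j := by omega
      have hx : ¬ (isB x ∧ j ≤ s) := by rintro ⟨_, h⟩; omega
      have hx' : ¬ (isB x ∧ j + 1 ≤ s) := by rintro ⟨_, h⟩; omega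
      rw [if_neg hx, if_neg hx']
      have hidx : (j - s).toNat = (j - (s+1)).toNat + 1 := by omega
      rw [hidx]
      simp only [List.getD_cons_succ]
      exact ih (s+1) j hjs (by simp at h2 ⊢; omega)

theorem mem_bkAux (xs : List String) : ∀ (s : Int) (b : Int), b ∈ bkAux xs s → s ≤ b ∧ b < s + xs.length := by
  induction xs with
  | nil => intro s b h; simp [bkAux_nil] at h
  | cons x xs ih =>
    intro s b h
    rw [bkAux_cons] at h
    rcases List.mem_append.1 h with h | h
    · have hbs : b = s := by
        split at h
        · simpa using h
        · simp at h
      subst hbs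
      refine ⟨le_refl _, ?_⟩
      have : (0:Int) ≤ xs.length := by positivity
      simp
    · have := ih (s+1) b h
      constructor <;> simp at this ⊢ <;> omega

theorem pairwise_bkAux (xs : List String) : ∀ s : Int, (bkAux xs s).Pairwise (· < ·) := by
  induction xs with
  | nil => intro s; simp [bkAux_nil]
  | cons x xs ih =>
    intro s
    rw [bkAux_cons]
    apply List.pairwise_append.2
    refine ⟨?_, ih (s+1), ?_⟩
    · by_cases hx : isB x <;> simp [hx]
    · intro a ha b hb
      have hb' := (mem_bkAux xs (s+1) b hb).1
      have : a = s := by by_cases hx : isB x <;> simp [hx] at ha; exact ha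
      omega

-- K: bisect-by-count = find-first-≥  on a strictly increasing list
theorem count_get_eq_find (bl : List Int) : ∀ (i d : Int), bl.Pairwise (· < ·) →
    (if h : bl.countP (fun b => decide (b < i)) < bl.length
      then bl[bl.countP (fun b => decide (b < i))] else d)
    = (bl.find? (fun b => decide (i ≤ b))).getD d := by
  induction bl with
  | nil => intro i d _; simp
  | cons b rest ih =>
    intro i d hp
    have hb : ∀ y ∈ rest, b < y := fun y hy => (List.pairwise_cons.1 hp).1 y hy
    have hrest : rest.Pairwise (· < ·) := (List.pairwise_cons.1 hp).2
    by_cases hlt : b < i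
    · have : ¬ (i ≤ b) := by omega
      rw [List.find?_cons_of_neg (by simp [this])]
      rw [← ih i d hrest]
      simp only [List.countP_cons, decide_eq_true_eq, if_pos hlt, List.length_cons]
      by_cases h1 : rest.countP (fun b => decide (b < i)) < rest.length
      · rw [dif_pos (by omega), dif_pos h1, List.getElem_cons_succ]
      · rw [dif_neg (by omega), dif_neg h1]
    · have hzero : rest.countP (fun b => decide (b < i)) = 0 := by
        apply List.countP_eq_zero.2; intro y hy
        have := hb y hy; simp; omega
      rw [List.find?_cons_of_pos (by simp; omega)]
      simp only [List.countP_cons, decide_eq_true_eq, if_neg hlt, hzero]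
      simp

theorem count_step (bl : List Int) : ∀ i : Int, bl.Pairwise (· < ·) →
    (if bl.countP (fun b => decide (b < i - 1)) < bl.length ∧
        bl.getD (bl.countP (fun b => decide (b < i - 1))) 0 < i
     then bl.countP (fun b => decide (b < i - 1)) + 1
     else bl.countP (fun b => decide (b < i - 1)))
    = bl.countP (fun b => decide (b < i)) := by
  induction bl with
  | nil => intro i _; simp
  | cons b rest ih =>
    intro i hp
    have hb : ∀ y ∈ rest, b < y := fun y hy => (List.pairwise_cons.1 hp).1 y hy
    have hrest : rest.Pairwise (· < ·) := (List.pairwise_cons.1 hp).2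
    by_cases h1 : b < i - 1
    · have ihr := ih i hrest
      simp only [List.countP_cons, decide_eq_true_eq, if_pos h1, if_pos (show b < i by omega),
        List.length_cons, List.getD_cons_succ]
      by_cases hc : rest.countP (fun b => decide (b < i - 1)) < rest.length ∧
          rest.getD (rest.countP (fun b => decide (b < i - 1))) 0 < i
      · rw [if_pos hc] at ihr
        rw [if_pos ⟨by omega, hc.2⟩]
        omega
      · rw [if_neg hc] at ihr
        rw [if_neg (by rintro ⟨ha, hb2⟩; exact hc ⟨by omega, hb2⟩)]
        omega
    · have hzero : rest.countP (fun b => decide (b < i - 1)) = 0 := by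
        apply List.countP_eq_zero.2; intro y hy
        have := hb y hy; simp; omega
      simp only [List.countP_cons, decide_eq_true_eq, if_neg h1, hzero, Nat.add_zero,
        List.length_cons, List.getD_cons_zero, Nat.zero_add]
      by_cases h2 : b < i
      · have hzi : rest.countP (fun b => decide (b < i)) = 0 := by
          apply List.countP_eq_zero.2; intro y hy
          have := hb y hy; simp; omega
        rw [if_pos ⟨by omega, h2⟩, if_pos h2, hzi]
      · have hzi : rest.countP (fun b => decide (b < i)) = 0 := by
          apply List.countP_eq_zero.2; intro y hy
          have := hb y hy; simp; omega
        rw [if_neg (by rintro ⟨_, h⟩; omega), if_neg h2, hzi]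

theorem pySetD_append (xs zs : List Int) (y v : Int) :
    PySem.List.pySetD (xs ++ y :: zs) (xs.length : Int) v = xs ++ v :: zs := by
  simp [PySem.List.pySetD, PySem.List.pySet?, PySem.List.pyIdx?]

def nbN (lines : List String) (j : Nat) : Int := g lines 0 (j : Int)

theorem A_loop (lines : List String) : ∀ t : Nat, t ≤ lines.length →
    ((PySem.List.pyRange ((t : Int) - 1) (-1) (-1)).foldl
      (fun (st : Int × List Int) j =>
        let nxt : Int :=
          if PySem.Str.startswith (PySem.List.pyGetD lines j "") "BLOCK " then j else st.1
        (nxt, PySem.List.pySetD st.2 j nxt))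
      (g lines 0 (t : Int),
       List.replicate t (lines.length : Int)
         ++ (List.range' t (lines.length - t)).map (nbN lines)))
    = (g lines 0 0, (List.range' 0 lines.length).map (nbN lines)) := by
  intro t
  induction t with
  | zero => intro _; rw [PySem.List.pyRange_neg_one_eq_nil (by omega)]; simp
  | succ t ih =>
    intro ht
    have hcast : ((t + 1 : Nat) : Int) - 1 = (t : Int) := by push_cast; ring
    rw [hcast, PySem.List.pyRange_neg_one_cons (by omega), List.foldl_cons]
    have hnxt :
        (if PySem.Str.startswith (PySem.List.pyGetD lines (t : Int) "") "BLOCK " then (t : Int)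
         else g lines 0 ((t + 1 : Nat) : Int)) = g lines 0 (t : Int) := by
      rw [g_step lines 0 (t : Int) (by positivity) (by simp; omega)]
      have : (((t : Int) - 0)).toNat = t := by omega
      rw [this]
      have : ((t + 1 : Nat) : Int) = (t : Int) + 1 := by push_cast; ring
      rw [this]
      simp [isB, PySem.List.pyGetD_natCast]
    have hres :
        PySem.List.pySetD
          (List.replicate (t + 1) (lines.length : Int)
            ++ (List.range' (t + 1) (lines.length - (t + 1))).map (nbN lines))
          (t : Int) (g lines 0 (t : Int))
        = List.replicate t (lines.length : Int)
            ++ (List.range' t (lines.length - t)).map (nbN lines) := by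
      rw [List.replicate_succ', List.append_assoc, List.singleton_append]
      have h := pySetD_append (List.replicate t (lines.length : Int))
        ((List.range' (t + 1) (lines.length - (t + 1))).map (nbN lines))
        (lines.length : Int) (g lines 0 (t : Int))
      rw [List.length_replicate] at h
      rw [h]
      have hnum : lines.length - t = (lines.length - (t + 1)) + 1 := by omega
      rw [hnum, List.range'_succ, List.map_cons]
      rfl
    simp only
    rw [hnxt, hres]
    exact ih (by omega)

theorem B_loop (lines : List String) : ∀ (d i : Nat), i + d = lines.length →
    ((PySem.List.pyRange (i : Int) ((lines.length : Int)) 1).foldl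
      (fun (st : List Int × Int) j =>
        let k : Int :=
          if st.2 < PySem.List.len (bkAux lines 0) ∧
              PySem.List.pyGetD (bkAux lines 0) st.2 0 < j
          then st.2 + 1 else st.2
        (st.1 ++ [if k < PySem.List.len (bkAux lines 0)
                  then PySem.List.pyGetD (bkAux lines 0) k 0
                  else (lines.length : Int)], k))
      ((List.range' 0 i).map (nbN lines),
       ((bkAux lines 0).countP (fun b => decide (b < (i : Int) - 1)) : Int)))
    = ((List.range' 0 lines.length).map (nbN lines),
       ((bkAux lines 0).countP (fun b => decide (b < (lines.length : Int) - 1)) : Int)) := by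
  intro d
  induction d with
  | zero =>
    intro i h
    have hi : i = lines.length := by omega
    subst hi
    rw [PySem.List.pyRange_one_eq_nil (le_refl _)]
    simp
  | succ d ih =>
    intro i h
    have hilt : (i : Int) < (lines.length : Int) := by exact_mod_cast (by omega : i < lines.length)
    rw [PySem.List.pyRange_one_cons hilt, List.foldl_cons]
    have hp := pairwise_bkAux lines 0
    set bl := bkAux lines 0 with hbl
    have hk :
        (if ((bl.countP (fun b => decide (b < (i : Int) - 1)) : Int)) < PySem.List.len bl ∧
            PySem.List.pyGetD bl ((bl.countP (fun b => decide (b < (i : Int) - 1)) : Int)) 0 < (i : Int)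
         then ((bl.countP (fun b => decide (b < (i : Int) - 1)) : Int)) + 1
         else ((bl.countP (fun b => decide (b < (i : Int) - 1)) : Int)))
        = ((bl.countP (fun b => decide (b < (i : Int))) : Int)) := by
      have hcs := count_step bl (i : Int) hp
      by_cases hcond : bl.countP (fun b => decide (b < (i : Int) - 1)) < bl.length ∧
          bl.getD (bl.countP (fun b => decide (b < (i : Int) - 1))) 0 < (i : Int)
      · rw [if_pos hcond] at hcs
        rw [if_pos ⟨by rw [PySem.List.len_eq]; exact_mod_cast hcond.1,
                    by rw [PySem.List.pyGetD_natCast]; exact hcond.2⟩]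
        push_cast [← hcs]; ring
      · rw [if_neg hcond] at hcs
        rw [if_neg (by
          rintro ⟨h1, h2⟩
          rw [PySem.List.len_eq] at h1
          exact hcond ⟨by exact_mod_cast h1, by rwa [PySem.List.pyGetD_natCast] at h2⟩)]
        exact_mod_cast hcs
    have happ :
        (if ((bl.countP (fun b => decide (b < (i : Int))) : Int)) < PySem.List.len bl
         then PySem.List.pyGetD bl ((bl.countP (fun b => decide (b < (i : Int))) : Int)) 0
         else (lines.length : Int))
        = nbN lines i := by
      have hk2 := count_get_eq_find bl (i : Int) (lines.length : Int) hp
      by_cases hcl : bl.countP (fun b => decide (b < (i : Int))) < bl.length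
      · rw [dif_pos hcl] at hk2
        rw [if_pos (by rw [PySem.List.len_eq]; exact_mod_cast hcl),
            PySem.List.pyGetD_natCast]
        rw [List.getD_eq_getElem _ _ hcl, hk2]
        simp [nbN, g, hbl]
      · rw [dif_neg hcl] at hk2
        rw [if_neg (by rw [PySem.List.len_eq]; intro hcc; exact hcl (by exact_mod_cast hcc))]
        rw [hk2]
        simp [nbN, g, hbl]
    simp only
    rw [hk, happ]
    have hacc : (List.range' 0 i).map (nbN lines) ++ [nbN lines i]
        = (List.range' 0 (i + 1)).map (nbN lines) := by
      rw [List.range'_concat, List.map_append]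
      simp
    rw [hacc]
    have hi1 : (i : Int) + 1 = ((i + 1 : Nat) : Int) := by push_cast; ring
    have hcnt : ((bl.countP (fun b => decide (b < (i : Int))) : Int))
        = ((bl.countP (fun b => decide (b < ((i + 1 : Nat) : Int) - 1)) : Int)) := by
      have h2 : ((i + 1 : Nat) : Int) - 1 = (i : Int) := by push_cast; ring
      simp only [h2]
    rw [hi1, hcnt]
    exact ih (i + 1) (by omega)

theorem portA_eq (lines : List String) :
    next_block_index_py lines = (List.range' 0 lines.length).map (nbN lines) := by
  unfold next_block_index_py
  simp only [PySem.List.len_eq, PySem.List.pyRepeat_singleton]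
  have ht : ((lines.length : Int)).toNat = lines.length := by omega
  rw [ht]
  have h := A_loop lines lines.length (le_refl _)
  rw [g_high lines 0 (lines.length : Int) (by simp)] at h
  simp only [Nat.sub_self, List.range'_zero, List.map_nil, List.append_nil, zero_add] at h
  rw [h]

theorem portB_eq (lines : List String) :
    next_block_index_py_alt lines = (List.range' 0 lines.length).map (nbN lines) := by
  unfold next_block_index_py_alt
  simp only [PySem.List.len_eq]
  have hb : ((PySem.List.enumerate lines).filter
      (fun p => PySem.Str.startswith p.2 "BLOCK ")).map (fun p => p.1) = bkAux lines 0 := rfl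
  rw [hb]
  have h := B_loop lines lines.length 0 (by omega)
  simp only [PySem.List.len_eq] at h
  have hz : (((0 : Nat) : Int)) = (0 : Int) := by norm_num
  rw [hz] at h
  have hc0 : (bkAux lines 0).countP (fun b => decide (b < (0 : Int) - 1)) = 0 := by
    apply List.countP_eq_zero.2
    intro b hbm
    have := (mem_bkAux lines 0 b hbm).1
    simp; omega
  rw [hc0] at h
  simp only [List.range'_zero, List.map_nil, Nat.cast_zero] at h
  rw [h]

-- ===== VERDICT (by name: the statement is the Claim_ definition above) =====
theorem next_block_index_py_spec : Claim_equal_next_block_index_py := by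
  intro lines _
  unfold Spec_next_block_index_py
  rw [portA_eq, portB_eq]
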